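-- pv_equiv track=rewrite | github.com/Taardisaa/slai-the-spire | src/rl/comm_mod/handlers/rules.py | handle_default
-- ===== SOURCE A (Python) =====
-- def handle_default(msg: dict) -> str:
--     """Fallback: PROCEED / CONFIRM / continue."""
--     available = set(msg.get("available_commands", []) or [])
--     for cmd in ("proceed", "confirm", "continue", "skip", "cancel", "return"):
--         if cmd in available:
--             return cmd
--     if "choose" in available:
--         return "choose 0"
--     return "wait 10"
-- ===== SOURCE B (Python) =====
-- def handle_default(msg: dict) -> str:
--     """Fallback: PROCEED / CONFIRM / continue."""
--     rank = {"proceed": 0, "confirm": 1, "continue": 2, "skip": 3,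
--             "cancel": 4, "return": 5, "choose": 6}
--     best = 7
--     best_cmd = None
--     for cmd in msg.get("available_commands", []) or []:
--         r = rank.get(cmd, 7)
--         if r < best:
--             best, best_cmd = r, cmd
--     if best <= 5:
--         return best_cmd
--     if best == 6:
--         return "choose 0"
--     return "wait 10"
-- ===== Notes on version B (the rewrite author's own statement) =====
-- stated objective: alternative
-- what changed: Instead of six sequential membership tests of a fixed priority tuple against a set built from the input, B makes one pass over the available commands keeping the command of minimum priority rank from a rank dict, then decodes the best rank into the answer.
import Mathlib
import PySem

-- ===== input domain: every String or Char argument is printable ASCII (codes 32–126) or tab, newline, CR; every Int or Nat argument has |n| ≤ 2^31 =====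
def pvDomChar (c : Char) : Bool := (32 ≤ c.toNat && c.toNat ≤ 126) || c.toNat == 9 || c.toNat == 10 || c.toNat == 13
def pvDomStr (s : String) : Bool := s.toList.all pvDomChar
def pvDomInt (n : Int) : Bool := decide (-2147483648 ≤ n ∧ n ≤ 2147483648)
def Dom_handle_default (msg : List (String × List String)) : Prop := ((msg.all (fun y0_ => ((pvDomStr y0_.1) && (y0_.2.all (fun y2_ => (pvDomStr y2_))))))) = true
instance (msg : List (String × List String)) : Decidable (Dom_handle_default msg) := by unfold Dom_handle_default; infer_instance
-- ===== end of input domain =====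

-- B replaces A's sequential membership tests of a fixed priority tuple against a set by one pass
-- over the available commands keeping the minimum-rank command from a rank dict (alternative decomposition, same cost).

-- ===== PORT A =====
def handle_default (msg : List (String × List String)) : String :=
  let got := (PySem.Dict.mk msg).getD "available_commands" []
  let available : PySem.Set String := PySem.Set.ofList (if got.isEmpty then [] else got)
  match ["proceed", "confirm", "continue", "skip", "cancel", "return"].find?
      (fun cmd => PySem.Set.contains available cmd) with
  | some cmd => cmd
  | none => if PySem.Set.contains available "choose" then "choose 0" else "wait 10"

-- ===== PORT B =====
def pvRank : PySem.Dict String Int :=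
  PySem.Dict.mk [("proceed", 0), ("confirm", 1), ("continue", 2), ("skip", 3),
                 ("cancel", 4), ("return", 5), ("choose", 6)]

def handle_default_alt (msg : List (String × List String)) : String :=
  let cmds := (PySem.Dict.mk msg).getD "available_commands" []
  let st := cmds.foldl (fun (st : Int × Option String) cmd =>
      let r := pvRank.getD cmd 7
      if r < st.1 then (r, some cmd) else st) (7, none)
  if st.1 ≤ 5 then st.2.getD "" else if st.1 = 6 then "choose 0" else "wait 10"

-- ===== PRECONDITION & SPEC =====
def Spec_handle_default (msg : List (String × List String)) (out : String) : Prop := out = handle_default_alt msg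
instance (msg : List (String × List String)) (out : String) : Decidable (Spec_handle_default msg out) := by unfold Spec_handle_default; infer_instance

-- ===== CLAIM (what is proved, stated in full; the proofs are below) =====
def Claim_equal_handle_default : Prop := ∀ (msg : List (String × List String)), Dom_handle_default msg → Spec_handle_default msg (handle_default msg)

-- ===== LEMMAS AND PROOFS =====

def pvRk (c : String) : Int := pvRank.getD c 7

lemma rk_eq (c : String) : pvRk c =
    if c = "proceed" then 0 else if c = "confirm" then 1 else if c = "continue" then 2
    else if c = "skip" then 3 else if c = "cancel" then 4 else if c = "return" then 5
    else if c = "choose" then 6 else 7 := by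
  simp only [pvRk, pvRank, PySem.Dict.getD_eq_get?_getD, PySem.Dict.get?_mk_cons, beq_iff_eq]
  split_ifs with h0 h1 h2 h3 h4 h5 h6 <;> subst_eqs <;> first | rfl | (exfalso; simp_all)


def pvName (k : Int) : String :=
  if k = 0 then "proceed" else if k = 1 then "confirm" else if k = 2 then "continue"
  else if k = 3 then "skip" else if k = 4 then "cancel" else if k = 5 then "return"
  else if k = 6 then "choose" else ""

def pvOpt (b : Int) : Option String := if b < 7 then some (pvName b) else none

def pvMin (b : Int) (cmds : List String) : Int := cmds.foldl (fun m c => min m (pvRk c)) b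

lemma rk_nonneg (c : String) : 0 ≤ pvRk c := by rw [rk_eq c]; split_ifs <;> norm_num

lemma name_rk (c : String) (h : pvRk c < 7) : pvName (pvRk c) = c := by
  rw [rk_eq c] at *
  split_ifs at * <;> simp_all [pvName]

lemma min_le_b : ∀ (cmds : List String) (b : Int), pvMin b cmds ≤ b
  | [], _ => le_refl _
  | x :: t, b => le_trans (min_le_b t (min b (pvRk x))) (min_le_left _ _)

lemma min_le_of_mem : ∀ (cmds : List String) (c : String), c ∈ cmds → ∀ b : Int, pvMin b cmds ≤ pvRk c := by
  intro cmds
  induction cmds with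
  | nil => intro c h; cases h
  | cons x t ih =>
    intro c h b
    rcases List.mem_cons.mp h with rfl | hm
    · exact le_trans (min_le_b t _) (min_le_right _ _)
    · exact ih c hm _

lemma min_attained : ∀ (cmds : List String) (b : Int),
    pvMin b cmds = b ∨ ∃ c ∈ cmds, pvMin b cmds = pvRk c := by
  intro cmds
  induction cmds with
  | nil => intro b; left; rfl
  | cons x t ih =>
    intro b
    rcases ih (min b (pvRk x)) with h | ⟨c, hc, h⟩
    · rcases min_cases b (pvRk x) with ⟨he, _⟩ | ⟨he, _⟩
      · left; show pvMin (min b (pvRk x)) t = b; rw [h, he]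
      · right; exact ⟨x, List.mem_cons_self, by show pvMin (min b (pvRk x)) t = _; rw [h, he]⟩
    · right; exact ⟨c, List.mem_cons_of_mem _ hc, h⟩

lemma min_nonneg (cmds : List String) : 0 ≤ pvMin 7 cmds := by
  rcases min_attained cmds 7 with h | ⟨c, _, h⟩
  · rw [h]; norm_num
  · rw [h]; exact rk_nonneg c

lemma fold_eq_min : ∀ (cmds : List String) (b : Int), b ≤ 7 →
    cmds.foldl (fun (st : Int × Option String) cmd =>
      let r := pvRank.getD cmd 7
      if r < st.1 then (r, some cmd) else st) (b, pvOpt b)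
    = (pvMin b cmds, pvOpt (pvMin b cmds)) := by
  intro cmds
  induction cmds with
  | nil => intro b _; rfl
  | cons c t ih =>
    intro b hb
    have hstep : (if pvRk c < b then (pvRk c, some c) else (b, pvOpt b))
        = (min b (pvRk c), pvOpt (min b (pvRk c))) := by
      by_cases h : pvRk c < b
      · have hr : pvRk c < 7 := lt_of_lt_of_le h hb
        rw [if_pos h, min_eq_right (le_of_lt h)]
        simp [pvOpt, hr, name_rk c hr]
      · rw [if_neg h, min_eq_left (by omega)]
    show List.foldl _ (if pvRk c < b then (pvRk c, some c) else (b, pvOpt b)) t = _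
    rw [hstep, ih (min b (pvRk c)) (le_trans (min_le_left _ _) hb)]
    rfl

lemma mem_of_min_eq {cmds : List String} {k : Int} (hk : k < 7)
    (h : pvMin 7 cmds = k) : pvName k ∈ cmds := by
  rcases min_attained cmds 7 with h7 | ⟨c, hc, he⟩
  · omega
  · have : pvRk c = k := by omega
    rw [← this, name_rk c (by omega)]; exact hc

lemma min_le_of_name_mem {cmds : List String} {k : Int} (hk0 : 0 ≤ k) (hk : k < 7)
    (h : pvName k ∈ cmds) : pvMin 7 cmds ≤ k := by
  have h1 := min_le_of_mem cmds _ h 7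
  have hrk : pvRk (pvName k) = k := by
    interval_cases k <;> decide
  omega

lemma ab_eq (msg : List (String × List String)) : handle_default msg = handle_default_alt msg := by
  unfold handle_default handle_default_alt
  dsimp only
  set cmds := (PySem.Dict.mk msg).getD "available_commands" [] with hcmds
  have hset : (if cmds.isEmpty then ([] : List String) else cmds) = cmds := by
    cases cmds <;> simp
  rw [hset]
  have hcontains : ∀ x : String,
      PySem.Set.contains (PySem.Set.ofList cmds) x = decide (x ∈ cmds) := by
    intro x
    simp only [PySem.Set.contains_eq_listContains, List.contains_eq_mem, PySem.Set.mem_ofList]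
  have hfold := fold_eq_min cmds 7 (le_refl 7)
  have h7 : pvOpt 7 = none := rfl
  rw [← h7, hfold]
  set m := pvMin 7 cmds with hm
  have hm0 : 0 ≤ m := min_nonneg cmds
  have hm7 : m ≤ 7 := min_le_b cmds 7
  have hin : ∀ k : Int, k < 7 → m = k → pvName k ∈ cmds := fun k h7 he => mem_of_min_eq h7 he
  have hout : ∀ k : Int, 0 ≤ k → k < 7 → k < m → pvName k ∉ cmds := by
    intro k h0 h7 hkm h
    exact absurd (min_le_of_name_mem h0 h7 h) (by omega)
  clear hfold hcmds hm
  interval_cases m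
  · have hk : "proceed" ∈ cmds := hin 0 (by norm_num) rfl
    simp only [List.find?, hcontains]
    norm_num [hk, pvOpt, pvName]
  · have h0 : "proceed" ∉ cmds := hout 0 (by norm_num) (by norm_num) (by norm_num)
    have hk : "confirm" ∈ cmds := hin 1 (by norm_num) rfl
    simp only [List.find?, hcontains]
    norm_num [h0, hk, pvOpt, pvName]
  · have h0 : "proceed" ∉ cmds := hout 0 (by norm_num) (by norm_num) (by norm_num)
    have h1 : "confirm" ∉ cmds := hout 1 (by norm_num) (by norm_num) (by norm_num)
    have hk : "continue" ∈ cmds := hin 2 (by norm_num) rfl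
    simp only [List.find?, hcontains]
    norm_num [h0, h1, hk, pvOpt, pvName]
  · have h0 : "proceed" ∉ cmds := hout 0 (by norm_num) (by norm_num) (by norm_num)
    have h1 : "confirm" ∉ cmds := hout 1 (by norm_num) (by norm_num) (by norm_num)
    have h2 : "continue" ∉ cmds := hout 2 (by norm_num) (by norm_num) (by norm_num)
    have hk : "skip" ∈ cmds := hin 3 (by norm_num) rfl
    simp only [List.find?, hcontains]
    norm_num [h0, h1, h2, hk, pvOpt, pvName]
  · have h0 : "proceed" ∉ cmds := hout 0 (by norm_num) (by norm_num) (by norm_num)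
    have h1 : "confirm" ∉ cmds := hout 1 (by norm_num) (by norm_num) (by norm_num)
    have h2 : "continue" ∉ cmds := hout 2 (by norm_num) (by norm_num) (by norm_num)
    have h3 : "skip" ∉ cmds := hout 3 (by norm_num) (by norm_num) (by norm_num)
    have hk : "cancel" ∈ cmds := hin 4 (by norm_num) rfl
    simp only [List.find?, hcontains]
    norm_num [h0, h1, h2, h3, hk, pvOpt, pvName]
  · have h0 : "proceed" ∉ cmds := hout 0 (by norm_num) (by norm_num) (by norm_num)
    have h1 : "confirm" ∉ cmds := hout 1 (by norm_num) (by norm_num) (by norm_num)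
    have h2 : "continue" ∉ cmds := hout 2 (by norm_num) (by norm_num) (by norm_num)
    have h3 : "skip" ∉ cmds := hout 3 (by norm_num) (by norm_num) (by norm_num)
    have h4 : "cancel" ∉ cmds := hout 4 (by norm_num) (by norm_num) (by norm_num)
    have hk : "return" ∈ cmds := hin 5 (by norm_num) rfl
    simp only [List.find?, hcontains]
    norm_num [h0, h1, h2, h3, h4, hk, pvOpt, pvName]
  · have h0 : "proceed" ∉ cmds := hout 0 (by norm_num) (by norm_num) (by norm_num)
    have h1 : "confirm" ∉ cmds := hout 1 (by norm_num) (by norm_num) (by norm_num)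
    have h2 : "continue" ∉ cmds := hout 2 (by norm_num) (by norm_num) (by norm_num)
    have h3 : "skip" ∉ cmds := hout 3 (by norm_num) (by norm_num) (by norm_num)
    have h4 : "cancel" ∉ cmds := hout 4 (by norm_num) (by norm_num) (by norm_num)
    have h5 : "return" ∉ cmds := hout 5 (by norm_num) (by norm_num) (by norm_num)
    have hk : "choose" ∈ cmds := hin 6 (by norm_num) rfl
    simp only [List.find?, hcontains]
    norm_num [h0, h1, h2, h3, h4, h5, hk, pvOpt, pvName]
  · have h0 : "proceed" ∉ cmds := hout 0 (by norm_num) (by norm_num) (by norm_num)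
    have h1 : "confirm" ∉ cmds := hout 1 (by norm_num) (by norm_num) (by norm_num)
    have h2 : "continue" ∉ cmds := hout 2 (by norm_num) (by norm_num) (by norm_num)
    have h3 : "skip" ∉ cmds := hout 3 (by norm_num) (by norm_num) (by norm_num)
    have h4 : "cancel" ∉ cmds := hout 4 (by norm_num) (by norm_num) (by norm_num)
    have h5 : "return" ∉ cmds := hout 5 (by norm_num) (by norm_num) (by norm_num)
    have h6 : "choose" ∉ cmds := hout 6 (by norm_num) (by norm_num) (by norm_num)
    simp only [List.find?, hcontains]
    norm_num [h0, h1, h2, h3, h4, h5, h6, pvOpt, pvName]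


-- ===== VERDICT (by name: the statement is the Claim_ definition above) =====
theorem handle_default_spec : Claim_equal_handle_default := by
  intro msg _
  unfold Spec_handle_default
  exact ab_eq msg
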